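-- pv_equiv track=rewrite | github.com/lpullela/mi3_anemia | one_hot.py | bp_syst
-- ===== SOURCE A (Python) =====
-- def bp_syst( age_col ):
-- 	bins = [ 80,100 ]
-- 	start = 100
-- 	while start < 160:
-- 		bins.append( start + 5 )
-- 		start = start + 5
--
-- 	one_hot_array = []
--
-- 	for element in age_col:
-- 		app = True
-- 		for i in range ( len( bins )):
-- 			if int( element ) < bins[ i ]:
-- 				one_hot_array.append( i )
-- 				app = False
-- 				break
-- 		if app:
-- 			one_hot_array.append( len( bins ))
--
-- 	return one_hot_array
-- ===== SOURCE B (Python) =====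
-- def bp_syst(age_col):
--     # closed-form bin index instead of building the bins list and scanning it
--     out = []
--     for element in age_col:
--         v = int(element)
--         if v < 80:
--             out.append(0)
--         elif v < 100:
--             out.append(1)
--         elif v >= 160:
--             out.append(14)
--         else:
--             out.append((v - 100) // 5 + 2)
--     return out
-- ===== Notes on version B (the rewrite author's own statement) =====
-- stated objective: simpler
-- what changed: B replaces building the bins list and linearly scanning it per element with a direct closed-form arithmetic bin index ((v-100)//5+2 with two boundary branches).
import Mathlib
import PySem

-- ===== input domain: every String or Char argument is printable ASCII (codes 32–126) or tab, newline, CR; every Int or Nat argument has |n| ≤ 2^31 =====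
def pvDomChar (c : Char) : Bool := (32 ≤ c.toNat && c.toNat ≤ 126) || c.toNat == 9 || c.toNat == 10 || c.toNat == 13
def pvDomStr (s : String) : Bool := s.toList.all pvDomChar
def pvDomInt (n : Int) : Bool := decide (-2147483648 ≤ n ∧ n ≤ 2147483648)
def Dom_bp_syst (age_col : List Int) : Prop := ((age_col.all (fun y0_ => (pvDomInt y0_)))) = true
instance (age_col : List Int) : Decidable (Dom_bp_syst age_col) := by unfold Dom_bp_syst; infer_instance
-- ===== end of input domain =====

-- B computes the bin index by a closed-form arithmetic formula instead of A's build-bins-then-scan loop.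

-- ===== PORT A =====
-- while start < 160: bins.append(start+5); start += 5
-- (fuel = (160 - start).toNat bounds the loop; it only makes the recursion structural, the steps are A's)
def bpBuildBinsAux : Nat → List Int → Int → List Int
  | 0, bins, _ => bins
  | fuel + 1, bins, start =>
      if start < 160 then bpBuildBinsAux fuel (bins ++ [start + 5]) (start + 5) else bins

def bpBuildBins (bins : List Int) (start : Int) : List Int :=
  bpBuildBinsAux (160 - start).toNat bins start

-- inner for-i-in-range(len(bins)) loop: first i with v < bins[i], else len(bins)
def bpScan (v : Int) (l : List Int) (i : Int) (n : Int) : Int :=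
  match l with
  | [] => n
  | b :: rest => if v < b then i else bpScan v rest (i + 1) n

def bp_syst (age_col : List Int) : List Int :=
  let bins := bpBuildBins [80, 100] 100
  age_col.map (fun element => bpScan element bins 0 (bins.length : Int))

-- ===== PORT B =====
def bpBinFor (v : Int) : Int :=
  if v < 80 then 0
  else if v < 100 then 1
  else if v ≥ 160 then 14
  else PySem.Int.floordiv (v - 100) 5 + 2

def bp_syst_alt (age_col : List Int) : List Int :=
  age_col.map bpBinFor

-- ===== PRECONDITION & SPEC =====
def Spec_bp_syst (age_col : List Int) (out : List Int) : Prop := out = bp_syst_alt age_col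
instance (age_col : List Int) (out : List Int) : Decidable (Spec_bp_syst age_col out) := by unfold Spec_bp_syst; infer_instance

-- ===== CLAIM (what is proved, stated in full; the proofs are below) =====
def Claim_equal_bp_syst : Prop := ∀ (age_col : List Int), Dom_bp_syst age_col → Spec_bp_syst age_col (bp_syst age_col)

-- ===== LEMMAS AND PROOFS =====
theorem bpBuildBins_eval :
    bpBuildBins [80, 100] 100 = [80,100,105,110,115,120,125,130,135,140,145,150,155,160] := by
  simp [bpBuildBins, bpBuildBinsAux]

set_option maxHeartbeats 1000000 in
theorem bpScan_eq_binFor (v : Int) :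
    bpScan v [80,100,105,110,115,120,125,130,135,140,145,150,155,160] 0 14 = bpBinFor v := by
  by_cases h0 : v < 80
  · simp [bpScan, bpBinFor, h0] <;> omega
  by_cases h1 : v < 100
  · simp [bpScan, bpBinFor, h0, h1] <;> omega
  by_cases h2 : v < 105
  · simp [bpScan, bpBinFor, h0, h1, h2, show ¬(v ≥ 160) by omega] <;> omega
  by_cases h3 : v < 110
  · simp [bpScan, bpBinFor, h0, h1, h2, h3, show ¬(v ≥ 160) by omega] <;> omega
  by_cases h4 : v < 115
  · simp [bpScan, bpBinFor, h0, h1, h2, h3, h4, show ¬(v ≥ 160) by omega] <;> omega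
  by_cases h5 : v < 120
  · simp [bpScan, bpBinFor, h0, h1, h2, h3, h4, h5, show ¬(v ≥ 160) by omega] <;> omega
  by_cases h6 : v < 125
  · simp [bpScan, bpBinFor, h0, h1, h2, h3, h4, h5, h6, show ¬(v ≥ 160) by omega] <;> omega
  by_cases h7 : v < 130
  · simp [bpScan, bpBinFor, h0, h1, h2, h3, h4, h5, h6, h7, show ¬(v ≥ 160) by omega] <;> omega
  by_cases h8 : v < 135
  · simp [bpScan, bpBinFor, h0, h1, h2, h3, h4, h5, h6, h7, h8, show ¬(v ≥ 160) by omega] <;> omega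
  by_cases h9 : v < 140
  · simp [bpScan, bpBinFor, h0, h1, h2, h3, h4, h5, h6, h7, h8, h9, show ¬(v ≥ 160) by omega] <;> omega
  by_cases h10 : v < 145
  · simp [bpScan, bpBinFor, h0, h1, h2, h3, h4, h5, h6, h7, h8, h9, h10, show ¬(v ≥ 160) by omega] <;> omega
  by_cases h11 : v < 150
  · simp [bpScan, bpBinFor, h0, h1, h2, h3, h4, h5, h6, h7, h8, h9, h10, h11, show ¬(v ≥ 160) by omega] <;> omega
  by_cases h12 : v < 155
  · simp [bpScan, bpBinFor, h0, h1, h2, h3, h4, h5, h6, h7, h8, h9, h10, h11, h12, show ¬(v ≥ 160) by omega] <;> omega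
  by_cases h13 : v < 160
  · simp [bpScan, bpBinFor, h0, h1, h2, h3, h4, h5, h6, h7, h8, h9, h10, h11, h12, h13, show ¬(v ≥ 160) by omega] <;> omega
  simp [bpScan, bpBinFor, h0, h1, h2, h3, h4, h5, h6, h7, h8, h9, h10, h11, h12, h13, show v ≥ 160 by omega]

-- ===== VERDICT (by name: the statement is the Claim_ definition above) =====
theorem bp_syst_spec : Claim_equal_bp_syst := by
  intro age_col _
  unfold Spec_bp_syst bp_syst bp_syst_alt
  simp only [bpBuildBins_eval]
  exact List.map_congr_left (fun v _ => bpScan_eq_binFor v)
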